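-- pv_equiv track=rewrite | github.com/yellalinghmargonda-photon/python | subset/removechar.py | skip2
-- ===== SOURCE A (Python) =====
-- def skip2(up):
--     if len(up)==1:
--         return up
--     ch=up[0]
--     if ch=='a':
--         return skip2(up[1::])
--     else:
--         return ch+skip2(up[1::])
-- ===== SOURCE B (Python) =====
-- def skip2(up):
--     # one pass: drop every 'a' except the last character, which is kept verbatim
--     return ''.join(c for c in up[:-1] if c != 'a') + up[-1]
-- ===== Notes on version B (the rewrite author's own statement) =====
-- stated objective: simpler
-- what changed: Replaced A's character-by-character recursion (quadratic due to repeated slicing/concatenation) with a single filtering pass over up[:-1] joined once, plus the unconditionally kept last character.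
import Mathlib
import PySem

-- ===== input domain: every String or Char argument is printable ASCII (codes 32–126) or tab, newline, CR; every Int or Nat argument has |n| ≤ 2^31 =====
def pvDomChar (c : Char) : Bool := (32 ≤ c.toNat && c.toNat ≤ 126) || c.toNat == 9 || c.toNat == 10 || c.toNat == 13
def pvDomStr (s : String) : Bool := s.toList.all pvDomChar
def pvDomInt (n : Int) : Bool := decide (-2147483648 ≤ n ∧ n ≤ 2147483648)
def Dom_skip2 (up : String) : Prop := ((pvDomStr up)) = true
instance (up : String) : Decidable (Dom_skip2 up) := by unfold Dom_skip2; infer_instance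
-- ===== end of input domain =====

-- B: one filtering pass over all but the last character plus the kept last character,
-- instead of A's recursion with repeated slicing; equivalence proved on nonempty strings.


-- ===== PORT A =====
-- A's recursion, step for step: len==1 returns up; otherwise ch = up[0],
-- recurse on up[1:] and keep ch unless it is 'a'.  The [] case is A's
-- IndexError (up[0] on the empty string), excluded by Pre_skip2.
def skip2List : List Char → List Char
  | [] => []
  | [c] => [c]
  | c :: rest@(_ :: _) =>
      if c = 'a' then skip2List rest else c :: skip2List rest

def skip2 (up : String) : String := String.ofList (skip2List up.toList)

-- ===== PORT B =====
-- Source B: ''.join(c for c in up[:-1] if c != 'a') + up[-1]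
-- up[:-1] = dropLast, up[-1] = the final one-character piece (Python raises on
-- the empty string, excluded by Pre_skip2; drop (len-1) is [] there).
def skip2_alt (up : String) : String :=
  String.ofList ((up.toList.dropLast.filter (fun c => c ≠ 'a')) ++
             up.toList.drop (up.toList.length - 1))

-- ===== PRECONDITION & SPEC =====
-- Pre_ excludes the empty string, on which both Pythons raise IndexError.
def Pre_skip2 (up : String) : Prop := up ≠ ""
instance (up : String) : Decidable (Pre_skip2 up) := by unfold Pre_skip2; infer_instance
def pvWitness_skip2 : String := "banana"

def Spec_skip2 (up : String) (out : String) : Prop := out = skip2_alt up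
instance (up : String) (out : String) : Decidable (Spec_skip2 up out) := by unfold Spec_skip2; infer_instance

-- ===== CLAIM (what is proved, stated in full; the proofs are below) =====
def Claim_equal_skip2 : Prop := ∀ (up : String), Dom_skip2 up → Pre_skip2 up → Spec_skip2 up (skip2 up)

-- ===== LEMMAS AND PROOFS =====
theorem skip2List_eq (l : List Char) (h : l ≠ []) :
    skip2List l = l.dropLast.filter (fun c => c ≠ 'a') ++ l.drop (l.length - 1) := by
  induction l with
  | nil => exact absurd rfl h
  | cons c rest ih =>
    cases rest with
    | nil => simp [skip2List]
    | cons d rs =>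
      have hr := ih (by simp)
      simp only [skip2List, hr]
      by_cases hc : c = 'a' <;>
        simp [hc, List.dropLast_cons₂, List.drop_succ_cons]

theorem skip2_spec_aux (up : String) (h : up ≠ "") : skip2 up = skip2_alt up := by
  unfold skip2 skip2_alt
  rw [skip2List_eq]
  intro hnil
  apply h
  have := congrArg String.ofList hnil
  simpa using this

-- ===== VERDICT (by name: the statement is the Claim_ definition above) =====
theorem skip2_spec : Claim_equal_skip2 := by
  intro up _ hpre
  exact skip2_spec_aux up hpre
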